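-- pv_equiv track=rewrite | github.com/avijitofficial95-blip/my-streamlit-site | nokia_parser.py | extract_dhcp_string
-- ===== SOURCE A (Python) =====
-- def extract_dhcp_string(raw_block, keyword="dhcp"):
--     lines = raw_block.split('\n')
--     in_dhcp = False
--     dhcp_lines = []
--
--     for line in lines:
--         stripped = line.strip()
--         if stripped == keyword:
--             in_dhcp = True
--             dhcp_lines.append(stripped)
--         elif in_dhcp:
--             dhcp_lines.append(stripped)
--             if stripped == "exit":
--                 break
--
--     return "\n".join(dhcp_lines) if dhcp_lines else ""
-- ===== SOURCE B (Python) =====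
-- def extract_dhcp_string(raw_block, keyword="dhcp"):
--     lines = [line.strip() for line in raw_block.split('\n')]
--     try:
--         start = lines.index(keyword)
--     except ValueError:
--         return ""
--     block = []
--     for s in lines[start:]:
--         block.append(s)
--         if s == "exit":
--             break
--     return "\n".join(block)
-- ===== Notes on version B (the rewrite author's own statement) =====
-- stated objective: simpler
-- what changed: Replaces the in_dhcp boolean state machine by a two-phase decomposition (strip all lines once, locate the keyword with list.index, then collect forward until the first exit line); Pre_ excludes keyword == "exit", the corner where the block opener and terminator coincide and A's branch ordering never terminates the block while B stops at the first exit line.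
-- outside the precondition, e.g. on extract_dhcp_string('exit\na\nexit', 'exit'): A returns 'exit\na\nexit', B returns 'exit'
import Mathlib
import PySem

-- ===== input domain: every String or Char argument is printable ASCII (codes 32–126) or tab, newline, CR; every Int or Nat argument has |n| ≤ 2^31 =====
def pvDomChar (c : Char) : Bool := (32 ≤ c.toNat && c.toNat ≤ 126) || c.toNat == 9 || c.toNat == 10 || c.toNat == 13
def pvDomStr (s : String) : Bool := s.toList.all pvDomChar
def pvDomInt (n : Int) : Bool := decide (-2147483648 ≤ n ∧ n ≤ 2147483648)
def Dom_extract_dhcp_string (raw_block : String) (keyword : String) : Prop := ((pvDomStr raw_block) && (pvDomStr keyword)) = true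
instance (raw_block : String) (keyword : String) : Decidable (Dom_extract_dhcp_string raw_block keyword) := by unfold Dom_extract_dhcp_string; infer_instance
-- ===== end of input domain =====

-- B replaces A's in_dhcp flag state machine by a two-phase decomposition
-- (strip all lines, find the keyword line's index, collect forward to the
-- first "exit" line); objective: simpler.

-- ===== PORT A =====
-- the for-loop of A: state = (in_dhcp, dhcp_lines); break returns the acc
def pvALoop (keyword : String) (lines : List String) (in_dhcp : Bool) (acc : List String) : List String :=
  match lines with
  | [] => acc
  | l :: rest =>
    let s := PySem.Str.strip l
    if s = keyword then pvALoop keyword rest true (acc ++ [s])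
    else if in_dhcp then
      if s = "exit" then acc ++ [s]
      else pvALoop keyword rest in_dhcp (acc ++ [s])
    else pvALoop keyword rest in_dhcp acc

def extract_dhcp_string (raw_block : String) (keyword : String) : String :=
  -- split? with the non-empty literal separator "\n" is always some; .getD [] only unwraps
  let lines := (PySem.Str.split? raw_block "\n").getD []
  let dhcp_lines := pvALoop keyword lines false []
  if dhcp_lines ≠ [] then PySem.Str.join "\n" dhcp_lines else ""

-- ===== PORT B =====
-- B's collection loop over the already-stripped tail
def pvBLoop (ss : List String) (acc : List String) : List String :=
  match ss with
  | [] => acc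
  | s :: rest =>
    if s = "exit" then acc ++ [s]
    else pvBLoop rest (acc ++ [s])

def extract_dhcp_string_alt (raw_block : String) (keyword : String) : String :=
  let ss := ((PySem.Str.split? raw_block "\n").getD []).map PySem.Str.strip
  match PySem.List.index? ss keyword with
  | none => ""
  | some start => PySem.Str.join "\n" (pvBLoop (ss.drop start) [])
    -- lines[start:] with start = list.index result (a Nat) is exactly List.drop start

-- ===== PRECONDITION & SPEC =====
-- Pre_ excludes keyword == "exit": there the block opener and terminator coincide, a
-- corner A's branch ordering resolves by never terminating the block (it collects to the
-- end of the input) while B stops at the first exit line; neither value is specified.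
def Pre_extract_dhcp_string (raw_block : String) (keyword : String) : Prop := keyword ≠ "exit"
instance (raw_block : String) (keyword : String) : Decidable (Pre_extract_dhcp_string raw_block keyword) := by unfold Pre_extract_dhcp_string; infer_instance

def pvWitness_extract_dhcp_string : String × String := ("x\ndhcp\n a \nexit\nz", "dhcp")

def Spec_extract_dhcp_string (raw_block : String) (keyword : String) (out : String) : Prop := out = extract_dhcp_string_alt raw_block keyword
instance (raw_block : String) (keyword : String) (out : String) : Decidable (Spec_extract_dhcp_string raw_block keyword out) := by unfold Spec_extract_dhcp_string; infer_instance

-- ===== CLAIM (what is proved, stated in full; the proofs are below) =====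
def Claim_equal_extract_dhcp_string : Prop := ∀ (raw_block : String) (keyword : String), Dom_extract_dhcp_string raw_block keyword → Pre_extract_dhcp_string raw_block keyword → Spec_extract_dhcp_string raw_block keyword (extract_dhcp_string raw_block keyword)

-- ===== LEMMAS AND PROOFS =====

theorem pvBLoop_ne_nil (ss acc : List String) (h : acc ≠ []) :
    pvBLoop ss acc ≠ [] := by
  induction ss generalizing acc with
  | nil => simpa [pvBLoop] using h
  | cons s rest ih =>
    simp only [pvBLoop]
    split
    · simp
    · exact ih _ (by simp)

-- once in_dhcp is set, A's loop is B's loop on the stripped lines (keyword ≠ "exit")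
theorem pvALoop_true_eq (keyword : String) (hkw : keyword ≠ "exit")
    (lines : List String) (acc : List String) :
    pvALoop keyword lines true acc = pvBLoop (lines.map PySem.Str.strip) acc := by
  induction lines generalizing acc with
  | nil => simp [pvALoop, pvBLoop]
  | cons l rest ih =>
    simp only [pvALoop, List.map_cons, pvBLoop]
    by_cases hk : PySem.Str.strip l = keyword
    · simp only [if_pos hk]
      rw [if_neg (by rw [hk]; exact hkw)]
      exact ih _
    · simp only [if_neg hk, if_pos]
      by_cases he : PySem.Str.strip l = "exit"
      · rw [if_pos he, if_pos he]
      · rw [if_neg he, if_neg he]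
        exact ih _

-- the pre-keyword scan of A is B's index?-then-collect phase
theorem pvALoop_false_eq (keyword : String) (hkw : keyword ≠ "exit") (lines : List String) :
    pvALoop keyword lines false [] =
      match PySem.List.index? (lines.map PySem.Str.strip) keyword with
      | none => []
      | some i => pvBLoop ((lines.map PySem.Str.strip).drop i) [] := by
  induction lines with
  | nil => simp [pvALoop, PySem.List.index?]
  | cons l rest ih =>
    simp only [pvALoop, List.map_cons]
    by_cases hk : PySem.Str.strip l = keyword
    · rw [if_pos hk, hk, PySem.List.index?_cons_self]
      simp only [List.drop_zero, pvBLoop]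
      rw [if_neg hkw, pvALoop_true_eq keyword hkw]
    · rw [if_neg hk, if_neg (by simp), PySem.List.index?_cons_of_ne _ hk, ih]
      cases h : PySem.List.index? (rest.map PySem.Str.strip) keyword with
      | none => simp
      | some i => simp

theorem index?_drop_ne_nil {α : Type} [DecidableEq α] {xs : List α} {v : α} {i : ℕ}
    (h : PySem.List.index? xs v = some i) : xs.drop i ≠ [] := by
  obtain ⟨hk, -, -⟩ := PySem.List.getElem_of_index?_eq_some h
  simp [List.drop_eq_nil_iff]
  omega

-- ===== VERDICT (by name: the statement is the Claim_ definition above) =====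
theorem extract_dhcp_string_spec : Claim_equal_extract_dhcp_string := by
  intro raw_block keyword _ hkw
  unfold Spec_extract_dhcp_string extract_dhcp_string extract_dhcp_string_alt
  simp only [pvALoop_false_eq keyword hkw]
  cases h : PySem.List.index? (((PySem.Str.split? raw_block "\n").getD []).map PySem.Str.strip) keyword with
  | none => simp
  | some i =>
    have hne : (((PySem.Str.split? raw_block "\n").getD []).map PySem.Str.strip).drop i ≠ [] :=
      index?_drop_ne_nil h
    have : pvBLoop ((((PySem.Str.split? raw_block "\n").getD []).map PySem.Str.strip).drop i) [] ≠ [] := by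
      cases hd : (((PySem.Str.split? raw_block "\n").getD []).map PySem.Str.strip).drop i with
      | nil => exact absurd hd hne
      | cons s t =>
        simp only [pvBLoop]
        split
        · simp
        · exact pvBLoop_ne_nil _ _ (by simp)
    simp [this]
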